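-- pv_equiv track=rewrite | github.com/BethanyCoulson/AdventOfCode | 2025/Day2/day2.py | part2
-- ===== SOURCE A (Python) =====
-- def part2(possible_ids):
--     total = 0
--     for id in possible_ids:
--         length = len(id)
--         half = length // 2
--         for i in range(1, half + 1):
--             chunks = [id[j:j+i] for j in range(0, length, i)]
--             if len(set(chunks)) == 1:
--                 total += int(id)
--                 break
--     return total
-- ===== SOURCE B (Python) =====
-- def part2(possible_ids):
--     # rotation trick: a nonempty string is a repetition of a shorter block
--     # exactly when it occurs inside (s+s) at a proper offset, i.e. in (s+s)[1:-1]
--     return sum(int(s) for s in possible_ids if s and s in (s + s)[1:-1])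
-- ===== Notes on version B (the rewrite author's own statement) =====
-- stated objective: faster
-- what changed: B drops the loop over candidate block lengths entirely and uses the rotation trick: a string is a repetition of a shorter block iff it occurs inside (s+s)[1:-1], one substring search per id.
import Mathlib
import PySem

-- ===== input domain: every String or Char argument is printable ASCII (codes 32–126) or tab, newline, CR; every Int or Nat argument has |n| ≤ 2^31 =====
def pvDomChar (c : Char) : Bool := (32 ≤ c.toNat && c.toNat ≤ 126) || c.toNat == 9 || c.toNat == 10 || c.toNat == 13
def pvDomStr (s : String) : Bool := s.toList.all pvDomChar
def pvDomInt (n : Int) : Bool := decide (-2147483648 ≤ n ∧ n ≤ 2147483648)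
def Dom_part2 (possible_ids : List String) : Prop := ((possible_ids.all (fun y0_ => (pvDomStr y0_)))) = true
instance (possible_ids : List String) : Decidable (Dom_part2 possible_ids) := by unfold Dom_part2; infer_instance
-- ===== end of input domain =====

-- B replaces A's loop over candidate block lengths by the rotation trick
-- (s is a repetition of a shorter block iff s occurs in (s+s)[1:-1]);
-- return-value equivalence only (neither program mutates its argument).

-- ===== PORT A =====
-- if len(set(chunks)) == 1 for chunks = [id[j:j+i] for j in range(0, length, i)]
def part2CondA (s : List Char) (n i : Int) : Bool :=
  (PySem.Set.ofList ((PySem.List.pyRange 0 n i).map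
      (fun j => PySem.List.slice s (some j) (some (j + i))))).length == 1

-- the inner 'for i in range(1, half+1): … break' loop, threading 'total'
def part2Loop (idStr : String) (s : List Char) (n : Int) (total : Int) : List Int → Int
  | [] => total
  | i :: rest =>
      if part2CondA s n i then total + (PySem.Int.ofStr? idStr).getD 0
      else part2Loop idStr s n total rest

def part2 (possible_ids : List String) : Int :=
  possible_ids.foldl (fun total idStr =>
    let s := idStr.toList
    let length : Int := s.length
    let half : Int := PySem.Int.floordiv length 2
    part2Loop idStr s length total (PySem.List.pyRange 1 (half + 1) 1)) 0

-- ===== PORT B =====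
-- 's and s in (s + s)[1:-1]'  (string ops ported on .toList; slice is PySem.List.slice,
-- exact for Python's s[1:-1], and 'in' is PySem.Chars.isIn)
def part2BCond (t : List Char) : Bool :=
  !t.isEmpty && PySem.Chars.isIn t (PySem.List.slice (t ++ t) (some 1) (some (-1)))

-- sum(int(s) for s in possible_ids if s and s in (s+s)[1:-1])
def part2_alt (possible_ids : List String) : Int :=
  ((possible_ids.filter (fun idStr => part2BCond idStr.toList)).map
    (fun idStr => (PySem.Int.ofStr? idStr).getD 0)).sum

-- ===== PRECONDITION & SPEC =====
-- Pre_ excludes exactly the lists containing an id that is a whole-number repetition of a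
-- proper block (so the counting branch fires) but is not parseable by int(): there both A
-- and B raise ValueError.
def Pre_part2 (possible_ids : List String) : Prop :=
  (possible_ids.all (fun idStr =>
    (PySem.Int.ofStr? idStr).isSome ||
    !((List.range idStr.toList.length).any (fun d =>
        decide (0 < d) && decide (2 * d ≤ idStr.toList.length) &&
        (idStr.toList.length % d == 0) &&
        ((List.replicate (idStr.toList.length / d) (idStr.toList.take d)).flatten
          == idStr.toList))))) = true
instance (possible_ids : List String) : Decidable (Pre_part2 possible_ids) := by
  unfold Pre_part2; infer_instance

def pvWitness_part2 : List String := ["1212", "7", "ab3"]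

def Spec_part2 (possible_ids : List String) (out : Int) : Prop := out = part2_alt possible_ids
instance (possible_ids : List String) (out : Int) : Decidable (Spec_part2 possible_ids out) := by unfold Spec_part2; infer_instance

-- ===== CLAIM (what is proved, stated in full; the proofs are below) =====
def Claim_equal_part2 : Prop := ∀ (possible_ids : List String), Dom_part2 possible_ids → Pre_part2 possible_ids → Spec_part2 possible_ids (part2 possible_ids)

-- ===== LEMMAS AND PROOFS =====

-- "l is a repetition of a proper block": the property both per-id tests decide
def PerProp (l : List Char) : Prop :=
  ∃ d : Nat, 0 < d ∧ 2 * d ≤ l.length ∧ d ∣ l.length ∧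
    (List.replicate (l.length / d) (l.take d)).flatten = l

-- Python's chunking [s[j:j+d] for j in range(0, len(s), d)], as a structural recursion
def chunkList (d : Nat) (s : List Char) : List (List Char) :=
  if h : d = 0 ∨ s = [] then [] else s.take d :: chunkList d (s.drop d)
termination_by s.length
decreasing_by
  rw [not_or] at h
  have h1 : 0 < s.length := List.length_pos_iff.mpr h.2
  have h2 : 0 < d := Nat.pos_of_ne_zero h.1
  simpa using Nat.sub_lt h1 h2

lemma chunkList_nil (d : Nat) : chunkList d [] = [] := by
  rw [chunkList]; simp

lemma chunkList_of_ne (d : Nat) (s : List Char) (hd : 0 < d) (hs : s ≠ []) :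
    chunkList d s = s.take d :: chunkList d (s.drop d) := by
  rw [chunkList]; simp [hs, Nat.pos_iff_ne_zero.mp hd]

lemma flatten_chunkList (d : Nat) (hd : 0 < d) :
    ∀ s : List Char, (chunkList d s).flatten = s := by
  suffices H : ∀ (fuel : Nat) (s : List Char), s.length ≤ fuel → (chunkList d s).flatten = s by
    intro s; exact H s.length s le_rfl
  intro fuel
  induction fuel with
  | zero =>
      intro s hs
      have : s = [] := List.eq_nil_of_length_eq_zero (Nat.le_zero.mp hs)
      subst this; simp [chunkList_nil]
  | succ m ih =>
      intro s hs
      rcases eq_or_ne s [] with rfl | hne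
      · simp [chunkList_nil]
      · rw [chunkList_of_ne d s hd hne]
        have hlen : (s.drop d).length ≤ m := by
          have := List.length_pos_iff.mpr hne
          simp only [List.length_drop]; omega
        simp [ih _ hlen]

lemma chunkList_replicate (d : Nat) (hd : 0 < d) (t : List Char) (ht : t.length = d) :
    ∀ k : Nat, chunkList d (List.replicate k t).flatten = List.replicate k t := by
  intro k
  induction k with
  | zero => simp [chunkList_nil]
  | succ m ih =>
      have htne : t ≠ [] := by
        intro h; rw [h] at ht; simp at ht; omega
      have hflat : (List.replicate (m + 1) t).flatten = t ++ (List.replicate m t).flatten := by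
        simp [List.replicate_succ]
      have hne : (List.replicate (m + 1) t).flatten ≠ [] := by
        rw [hflat]; simp [htne]
      rw [chunkList_of_ne d _ hd hne, hflat]
      rw [← ht, List.take_left, List.drop_left]
      rw [ht, ih, List.replicate_succ]

-- the ceiling count of chunks
lemma range_map_eq_chunkList (d : Nat) (hd : 0 < d) :
    ∀ s : List Char,
      (List.range ((s.length + d - 1) / d)).map (fun k => (s.drop (d * k)).take d)
        = chunkList d s := by
  suffices H : ∀ (fuel : Nat) (s : List Char), s.length ≤ fuel →
      (List.range ((s.length + d - 1) / d)).map (fun k => (s.drop (d * k)).take d)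
        = chunkList d s by
    intro s; exact H s.length s le_rfl
  intro fuel
  induction fuel with
  | zero =>
      intro s hs
      have : s = [] := List.eq_nil_of_length_eq_zero (Nat.le_zero.mp hs)
      subst this
      have h0 : (d - 1) / d = 0 := Nat.div_eq_of_lt (by omega)
      simp [h0, chunkList_nil]
  | succ m ih =>
      intro s hs
      rcases eq_or_ne s [] with rfl | hne
      · have h0 : (d - 1) / d = 0 := Nat.div_eq_of_lt (by omega)
        simp [h0, chunkList_nil]
      · have hpos : 0 < s.length := List.length_pos_iff.mpr hne
        have hK : (s.length + d - 1) / d = ((s.drop d).length + d - 1) / d + 1 := by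
          by_cases hle : s.length ≤ d
          · have hdrop : (s.drop d).length = 0 := by simp [List.length_drop]; omega
            rw [hdrop]
            have h1 : (0 + d - 1) / d = 0 := Nat.div_eq_of_lt (by omega)
            have h2 : (s.length + d - 1) / d = 1 :=
              Nat.div_eq_of_lt_le (by omega) (by omega)
            omega
          · have hdrop : (s.drop d).length = s.length - d := by simp [List.length_drop]
            rw [hdrop]
            have h1 : s.length + d - 1 = (s.length - d + d - 1) + d := by omega
            rw [h1, Nat.add_div_right _ hd]
        rw [hK, List.range_succ_eq_map]
        have hlen : (s.drop d).length ≤ m := by simp only [List.length_drop]; omega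
        rw [chunkList_of_ne d s hd hne]
        simp only [List.map_cons, List.map_map]
        refine List.cons_eq_cons.mpr ⟨by simp, ?_⟩
        · have ih' := ih _ hlen
          simp only [List.length_drop] at ih' ⊢
          rw [← ih']
          apply List.map_congr_left
          intro k _
          simp only [Function.comp]
          have hmul : d * Nat.succ k = d + d * k := by rw [Nat.succ_eq_add_one]; ring
          rw [hmul, ← List.drop_drop]

-- A's chunk comprehension IS chunkList
lemma chunks_eq (d : Nat) (hd : 0 < d) (s : List Char) :
    (PySem.List.pyRange 0 (s.length : Int) (d : Int)).map
        (fun j => PySem.List.slice s (some j) (some (j + (d : Int))))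
      = chunkList d s := by
  rw [PySem.List.pyRange_of_pos 0 (s.length : Int) (by exact_mod_cast hd)]
  rw [List.map_map]
  have hK : (if (0 : Int) < (s.length : Int)
      then (((s.length : Int) - 0 + (d : Int) - 1) / (d : Int)).toNat else 0)
      = (s.length + d - 1) / d := by
    rcases Nat.eq_zero_or_pos s.length with h0 | hpos
    · rw [h0]
      have hz : (d - 1) / d = 0 := Nat.div_eq_of_lt (by omega)
      simp [hz]
    · have hlt : (0 : Int) < (s.length : Int) := by exact_mod_cast hpos
      rw [if_pos hlt]
      have h1 : ((s.length : Int) - 0 + (d : Int) - 1) = ((s.length + d - 1 : Nat) : Int) := by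
        omega
      rw [h1]
      rfl
  rw [hK, ← range_map_eq_chunkList d hd s]
  apply List.map_congr_left
  intro k _
  simp only [Function.comp]
  have h1 : (0 + (d : Int) * (k : Int)) = ((d * k : Nat) : Int) := by push_cast; ring
  rw [h1, PySem.List.slice_natCast_add]

-- a Nodup list whose members all equal one present element is a singleton
lemma set_length_one_iff (l : List (List Char)) :
    ((PySem.Set.ofList l).length == 1) = true ↔ (l ≠ [] ∧ ∀ x ∈ l, ∀ y ∈ l, x = y) := by
  rw [beq_iff_eq, List.length_eq_one_iff]
  constructor
  · rintro ⟨a, ha⟩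
    have hmem : ∀ x, x ∈ l ↔ x = a := by
      intro x
      rw [← PySem.Set.mem_ofList l x, ha, List.mem_singleton]
    have hne : l ≠ [] := by
      intro h
      have := (hmem a).mpr rfl
      rw [h] at this; simp at this
    exact ⟨hne, fun x hx y hy => by rw [(hmem x).mp hx, (hmem y).mp hy]⟩
  · rintro ⟨hne, hall⟩
    rcases List.exists_mem_of_ne_nil l hne with ⟨a, ha⟩
    refine ⟨a, ?_⟩
    have hnd := PySem.Set.nodup_ofList l
    have hmem : ∀ x, x ∈ PySem.Set.ofList l ↔ x ∈ l := fun x => PySem.Set.mem_ofList l x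
    cases hS : PySem.Set.ofList l with
    | nil =>
        exfalso
        have := (hmem a).mpr ha
        rw [hS] at this; simp at this
    | cons b rest =>
        have hb : b ∈ l := (hmem b).mp (by rw [hS]; simp)
        have hba : b = a := hall b hb a ha
        subst hba
        cases rest with
        | nil => rfl
        | cons c rest' =>
            exfalso
            have hc : c ∈ l := (hmem c).mp (by rw [hS]; simp)
            have : c = b := hall c hc b hb
            rw [hS] at hnd
            simp [this] at hnd

-- the core pointwise fact: A's set test at chunk size d equals the divisor-repetition test
lemma condA_eq_condB (s : List Char) (d : Nat) (hd : 0 < d) (hdn : 2 * d ≤ s.length) :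
    part2CondA s (s.length : Int) (d : Int)
      = (s.length % d == 0 && ((List.replicate (s.length / d) (s.take d)).flatten == s)) := by
  have hdle : d ≤ s.length := by omega
  have hnpos : 0 < s.length := by omega
  have hsne : s ≠ [] := by
    intro h; rw [h] at hnpos; simp at hnpos
  have htlen : (s.take d).length = d := by simp [List.length_take]; omega
  rw [Bool.eq_iff_iff]
  unfold part2CondA
  rw [chunks_eq d hd s, set_length_one_iff]
  rw [Bool.and_eq_true, beq_iff_eq, beq_iff_eq]
  constructor
  · rintro ⟨hne, hall⟩
    have hcl : chunkList d s = s.take d :: chunkList d (s.drop d) := chunkList_of_ne d s hd hsne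
    have hhead : s.take d ∈ chunkList d s := by rw [hcl]; simp
    have hrep : chunkList d s = List.replicate (chunkList d s).length (s.take d) := by
      rw [List.eq_replicate_iff]
      exact ⟨rfl, fun b hb => hall b hb _ hhead⟩
    have hflat : s = (List.replicate (chunkList d s).length (s.take d)).flatten := by
      conv_lhs => rw [← flatten_chunkList d hd s]
      rw [← hrep]
    have hlen : s.length = (chunkList d s).length * d := by
      conv_lhs => rw [hflat]
      simp [List.length_flatten, List.map_replicate, List.sum_replicate, htlen]
    have hmod : s.length % d = 0 := by
      rw [hlen]; exact Nat.mul_mod_left _ d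
    have hdiv : s.length / d = (chunkList d s).length := by
      rw [hlen]; exact Nat.mul_div_cancel _ hd
    exact ⟨hmod, by rw [hdiv, ← hflat]⟩
  · rintro ⟨hmod, hflat⟩
    have hrep : chunkList d s = List.replicate (s.length / d) (s.take d) := by
      conv_lhs => rw [← hflat]
      exact chunkList_replicate d hd (s.take d) htlen (s.length / d)
    have hk : 0 < s.length / d := Nat.div_pos hdle hd
    refine ⟨?_, ?_⟩
    · rw [hrep]
      intro h
      have := congrArg List.length h
      simp at this
      omega
    · intro x hx y hy
      rw [hrep] at hx hy
      rw [List.eq_of_mem_replicate hx, List.eq_of_mem_replicate hy]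

-- the inner for/break loop is 'if any then total + v else total'
lemma part2Loop_eq_any (idStr : String) (s : List Char) (n : Int) :
    ∀ (is : List Int) (total : Int),
      part2Loop idStr s n total is
        = total + (if is.any (part2CondA s n) then (PySem.Int.ofStr? idStr).getD 0 else 0) := by
  intro is
  induction is with
  | nil => intro total; simp [part2Loop]
  | cons i rest ih =>
      intro total
      simp only [part2Loop, List.any_cons]
      by_cases h : part2CondA s n i
      · simp [h]
      · simp [h, ih total]

-- A's range(1, half+1) scan decides PerProp
lemma anyA_iff_per (s : List Char) :
    ((PySem.List.pyRange 1 (PySem.Int.floordiv (s.length : Int) 2 + 1) 1).any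
        (part2CondA s (s.length : Int))) = true ↔ PerProp s := by
  have hfl : PySem.Int.floordiv ((s.length : Nat) : Int) 2 = ((s.length / 2 : Nat) : Int) := by
    exact_mod_cast PySem.Int.floordiv_natCast s.length 2
  rw [hfl, List.any_eq_true]
  constructor
  · rintro ⟨i, hi, hp⟩
    rw [PySem.List.mem_pyRange_one] at hi
    obtain ⟨h1, h2⟩ := hi
    set d : Nat := i.toNat with hdd
    have hid : i = (d : Int) := by omega
    have hd : 0 < d := by omega
    have hdn : 2 * d ≤ s.length := by
      have : (d : Int) < (s.length / 2 : Nat) + 1 := by omega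
      have hle : d ≤ s.length / 2 := by exact_mod_cast Int.lt_add_one_iff.mp this
      have := Nat.div_mul_le_self s.length 2
      omega
    rw [hid, condA_eq_condB s d hd hdn, Bool.and_eq_true, beq_iff_eq, beq_iff_eq] at hp
    exact ⟨d, hd, hdn, Nat.dvd_iff_mod_eq_zero.mpr hp.1, hp.2⟩
  · rintro ⟨d, hd, hdn, hdvd, hflat⟩
    refine ⟨(d : Int), ?_, ?_⟩
    · rw [PySem.List.mem_pyRange_one]
      constructor
      · exact_mod_cast hd
      · have : d ≤ s.length / 2 := Nat.le_div_iff_mul_le (by omega) |>.mpr (by omega)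
        omega
    · rw [condA_eq_condB s d hd hdn, Bool.and_eq_true, beq_iff_eq, beq_iff_eq]
      exact ⟨Nat.dvd_iff_mod_eq_zero.mp hdvd, hflat⟩

-- ---- B side: the rotation trick decides the same property ----

-- if l is periodic with block d then rotating by d fixes l
lemma rotate_of_per (l : List Char) (d : Nat) (hd : 0 < d) (hdn : 2 * d ≤ l.length)
    (hflat : (List.replicate (l.length / d) (l.take d)).flatten = l) :
    l.rotate d = l := by
  have htlen : (l.take d).length = d := by simp [List.length_take]; omega
  have hm2 : 2 ≤ l.length / d := Nat.le_div_iff_mul_le (by omega) |>.mpr (by omega)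
  obtain ⟨j, hj⟩ : ∃ j, l.length / d = j + 1 := ⟨l.length / d - 1, by omega⟩
  rw [hj] at hflat
  have hdle : d ≤ l.length := by omega
  rw [List.rotate_eq_drop_append_take hdle]
  have hdrop : l.drop d = (List.replicate j (l.take d)).flatten := by
    conv_lhs => rw [← hflat, List.replicate_succ, List.flatten_cons]
    exact List.drop_left' htlen
  rw [hdrop]
  have hstep : (List.replicate j (l.take d)).flatten ++ l.take d
      = (List.replicate (j + 1) (l.take d)).flatten := by
    rw [List.replicate_succ']; simp
  rw [hstep, hflat]

-- a fixed rotation by a positive divisor makes l a repetition of its d-prefix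
lemma per_of_rotate_dvd :
    ∀ (c : Nat) (l : List Char) (g : Nat), 0 < g → l.length = c * g →
      l.take (l.length - g) = l.drop g →
      l = (List.replicate c (l.take g)).flatten := by
  intro c
  induction c with
  | zero => intro l g _ hlen _; simp_all [List.eq_nil_of_length_eq_zero]
  | succ k ih =>
      intro l g hg hlen hshift
      have hlen' : l.length = k * g + g := by rw [hlen]; ring
      have hgle : g ≤ l.length := by omega
      have hdg : l.drop g = l.take (l.length - g) := hshift.symm
      have hlq : (l.drop g).length - g = l.length - g - g := by simp
      have hshift' : (l.drop g).take ((l.drop g).length - g) = (l.drop g).drop g := by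
        rw [hlq]
        conv_rhs => rw [hdg, List.drop_take]
      have ihl := ih (l.drop g) g hg (by simp [List.length_drop]; omega) hshift'
      rcases Nat.eq_zero_or_pos k with hk0 | hk
      · subst hk0
        have hnil : l.drop g = [] := List.eq_nil_of_length_eq_zero (by simp; omega)
        rw [List.replicate_succ, List.flatten_cons]
        simp only [List.replicate_zero, List.flatten_nil, List.append_nil]
        conv_lhs => rw [← List.take_append_drop g l, hnil]
        simp
      · have htake : (l.drop g).take g = l.take g := by
          rw [hdg, List.take_take]
          have hmg : g ≤ k * g := Nat.le_mul_of_pos_left g hk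
          have hmin : min g (l.length - g) = g := by omega
          rw [hmin]
        rw [List.replicate_succ, List.flatten_cons]
        conv_lhs => rw [← List.take_append_drop g l]
        rw [ihl, htake]

-- from any fixed nontrivial rotation to a fixed rotation by the gcd
lemma rotate_pow (l : List Char) (k : Nat) (h : l.rotate k = l) :
    ∀ m : Nat, l.rotate (k * m) = l := by
  intro m
  induction m with
  | zero => simp
  | succ j ih =>
      have : k * (j + 1) = k * j + k := by ring
      rw [this, ← List.rotate_rotate, ih, h]

lemma per_of_rotate (l : List Char) (k : Nat) (hk1 : 1 ≤ k) (hk2 : k < l.length)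
    (hrot : l.rotate k = l) : PerProp l := by
  set n := l.length with hn
  set g := Nat.gcd k n with hg
  have hgpos : 0 < g := Nat.gcd_pos_of_pos_left n (by omega)
  have hgk : g ≤ k := Nat.le_of_dvd (by omega) (Nat.gcd_dvd_left k n)
  have hgdvd : g ∣ n := Nat.gcd_dvd_right k n
  have hglt : g < n := by omega
  have hgn2 : 2 * g ≤ n := by
    obtain ⟨c, hc⟩ := hgdvd
    have h2c : 2 ≤ c := by
      rcases Nat.lt_or_ge c 2 with h | h
      · interval_cases c <;> omega
      · exact h
    have hmm : g * 2 ≤ g * c := Nat.mul_le_mul_left g h2c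
    omega
  -- reach rotation by g via Bezout
  obtain ⟨m, _, hm⟩ := Nat.exists_mul_mod_eq_gcd (k := n) (n := k) (by omega)
  have hrotg : l.rotate g = l := by
    have h1 := rotate_pow l k hrot m
    have h2 : l.rotate (k * m % n) = l.rotate (k * m) := by
      rw [hn]; exact List.rotate_mod l (k * m)
    rw [hm] at h2
    rw [← hg] at h2
    rw [h2, h1]
  -- rotation by g = shift property
  have hshift : l.take (n - g) = l.drop g := by
    have := hrotg
    rw [List.rotate_eq_drop_append_take (by omega : g ≤ l.length)] at this
    have hlen : (l.drop g).length = n - g := by simp [List.length_drop]; omega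
    calc l.take (n - g) = (l.drop g ++ l.take g).take (n - g) := by rw [this]
      _ = l.drop g := List.take_left' hlen
  obtain ⟨c, hc⟩ := hgdvd
  have hc' : n = c * g := by rw [hc]; ring
  have hrep := per_of_rotate_dvd c l g hgpos hc' hshift
  have hdivc : l.length / g = c := by
    rw [← hn, hc']; exact Nat.mul_div_cancel c hgpos
  refine ⟨g, hgpos, hgn2, ⟨c, hc⟩, ?_⟩
  rw [hdivc]
  exact hrep.symm

-- the middle slice (t++t)[1:-1] in drop/take form (t nonempty)
lemma slice_mid (t : List Char) (hne : t ≠ []) :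
    PySem.List.slice (t ++ t) (some 1) (some (-1))
      = ((t ++ t).drop 1).take (2 * t.length - 1 - 1) := by
  have hlen : (t ++ t).length = 2 * t.length := by simp [List.length_append]; omega
  have hpos : 0 < t.length := List.length_pos_iff.mpr hne
  have h1 : PySem.List.slice (t ++ t) (some 1) (some (-1))
      = ((t ++ t).drop (PySem.List.clampIdx (t ++ t).length 1)).take
          (PySem.List.clampIdx (t ++ t).length (-1) - PySem.List.clampIdx (t ++ t).length 1) := by
    simp [PySem.List.slice]
  have h2 : PySem.List.clampIdx (t ++ t).length 1 = 1 := by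
    simp [PySem.List.clampIdx]
    omega
  rw [h1, PySem.List.clampIdx_neg_one, h2, hlen]

-- prefix of a drop of l++l at offset k ≤ n is exactly a fixed rotation
lemma prefix_drop_iff_rotate (l : List Char) (k : Nat) (hk : k ≤ l.length) :
    l <+: (l ++ l).drop k ↔ l.rotate k = l := by
  have hdrop : (l ++ l).drop k = l.drop k ++ l := List.drop_append_of_le_length hk
  have hlen : (l.drop k ++ l).length = l.length - k + l.length := by simp
  rw [hdrop]
  constructor
  · intro hpre
    have := List.prefix_iff_eq_take.mp hpre
    rw [List.rotate_eq_drop_append_take hk]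
    have htake : (l.drop k ++ l).take l.length = l.drop k ++ l.take k := by
      rw [List.take_append]
      congr 2
      · exact List.take_of_length_le (by simp)
      · simp; omega
    rw [← htake, ← this]
  · intro hrot
    rw [List.rotate_eq_drop_append_take hk] at hrot
    have h2 : l.drop k ++ l = (l.drop k ++ l.take k) ++ l.drop k := by
      rw [List.append_assoc, List.take_append_drop]
    rw [h2, hrot]
    exact List.prefix_append l (l.drop k)

-- B's test decides PerProp
lemma bcond_iff_per (l : List Char) : part2BCond l = true ↔ PerProp l := by
  unfold part2BCond
  rcases eq_or_ne l [] with rfl | hne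
  · simp [PerProp]
  · have hpos : 0 < l.length := List.length_pos_iff.mpr hne
    rw [Bool.and_eq_true]
    have hh : (!l.isEmpty) = true := by simp [hne]
    rw [slice_mid l hne]
    constructor
    · rintro ⟨-, hin⟩
      rw [← PySem.Chars.exists_prefix_drop_iff_isIn] at hin
      obtain ⟨j, hj⟩ := hin
      rw [List.drop_take, List.drop_drop] at hj
      have hjlen := List.IsPrefix.length_le hj
      have hle : l.length ≤ 2 * l.length - 1 - 1 - j := le_trans hjlen (by simp)
      rw [List.prefix_take_iff] at hj
      have hk1 : 1 ≤ 1 + j := by omega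
      have hk2 : 1 + j < l.length := by omega
      have hrot := (prefix_drop_iff_rotate l (1 + j) (by omega)).mp hj.1
      exact per_of_rotate l (1 + j) hk1 hk2 hrot
    · rintro ⟨d, hd, hdn, -, hflat⟩
      refine ⟨hh, ?_⟩
      rw [← PySem.Chars.exists_prefix_drop_iff_isIn]
      refine ⟨d - 1, ?_⟩
      have hrot := rotate_of_per l d hd hdn hflat
      have hdk : d ≤ l.length := by omega
      have hpre := (prefix_drop_iff_rotate l d hdk).mpr hrot
      rw [List.drop_take, List.drop_drop]
      have h1 : 1 + (d - 1) = d := by omega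
      rw [h1]
      rw [List.prefix_take_iff]
      exact ⟨hpre, by omega⟩

-- both per-id tests agree
lemma any_eq_bcond (s : List Char) :
    ((PySem.List.pyRange 1 (PySem.Int.floordiv (s.length : Int) 2 + 1) 1).any
        (part2CondA s (s.length : Int))) = part2BCond s := by
  rw [Bool.eq_iff_iff, anyA_iff_per, ← bcond_iff_per]

-- per-id contribution, folded over the list
lemma part2_foldl (ids : List String) :
    ∀ total : Int,
      ids.foldl (fun total idStr =>
        let s := idStr.toList
        let length : Int := s.length
        let half : Int := PySem.Int.floordiv length 2
        part2Loop idStr s length total (PySem.List.pyRange 1 (half + 1) 1)) total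
      = total + ((ids.filter (fun idStr => part2BCond idStr.toList)).map
          (fun idStr => (PySem.Int.ofStr? idStr).getD 0)).sum := by
  induction ids with
  | nil => intro total; simp
  | cons idStr rest ih =>
      intro total
      simp only [List.foldl_cons, List.filter_cons]
      rw [ih]
      rw [part2Loop_eq_any, any_eq_bcond]
      by_cases h : part2BCond idStr.toList
      · simp [h]; ring
      · simp [h]

-- ===== VERDICT (by name: the statement is the Claim_ definition above) =====
theorem part2_spec : Claim_equal_part2 := by
  intro possible_ids _ _
  unfold Spec_part2 part2 part2_alt
  rw [part2_foldl possible_ids 0, zero_add]
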